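-- pv_equiv track=rewrite | github.com/lagillenwater/multi-dwpc | archive/scripts/plot_path_instances_networks.py | _degree_from_paths
-- ===== SOURCE A (Python) =====
-- def _degree_from_paths(paths):
--     degrees = {}
--     for path in paths:
--         for idx in range(len(path) - 1):
--             n1 = (idx, path[idx])
--             n2 = (idx + 1, path[idx + 1])
--             degrees[n1] = degrees.get(n1, 0) + 1
--             degrees[n2] = degrees.get(n2, 0) + 1
--     return degrees
-- ===== SOURCE B (Python) =====
-- def _degree_from_paths(paths):
--     # pass 1: flatten all paths into (positioned-node, increment) contributions
--     contribs = [((idx, path[idx]), 1 if idx in (0, len(path) - 1) else 2)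
--                 for path in paths if len(path) >= 2
--                 for idx in range(len(path))]
--     # pass 2: aggregate the contributions into the degrees dict
--     degrees = {}
--     for key, inc in contribs:
--         degrees[key] = degrees.get(key, 0) + inc
--     return degrees
-- ===== Notes on version B (the rewrite author's own statement) =====
-- stated objective: alternative
-- what changed: B is a two-stage pipeline: it first flattens all paths into a list of (positioned-node, increment) contributions (1 at endpoints, 2 at interior positions, nothing for paths shorter than 2) and then aggregates that list into the dict in a separate pass, instead of A's nested loop over adjacent edge pairs that bumps both endpoints by 1 per edge.
import Mathlib
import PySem

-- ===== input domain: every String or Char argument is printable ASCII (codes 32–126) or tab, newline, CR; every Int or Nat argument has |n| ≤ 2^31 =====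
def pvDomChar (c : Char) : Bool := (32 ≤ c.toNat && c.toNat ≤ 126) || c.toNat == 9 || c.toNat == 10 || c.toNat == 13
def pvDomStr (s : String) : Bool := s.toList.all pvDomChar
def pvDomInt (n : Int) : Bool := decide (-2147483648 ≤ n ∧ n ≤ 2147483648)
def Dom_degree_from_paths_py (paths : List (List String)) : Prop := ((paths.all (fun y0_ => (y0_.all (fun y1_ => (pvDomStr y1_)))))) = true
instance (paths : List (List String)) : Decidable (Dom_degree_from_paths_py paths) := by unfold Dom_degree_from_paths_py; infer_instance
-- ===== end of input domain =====

-- B replaces A's nested per-edge loop (each edge bumps both endpoint positions by 1) with a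
-- two-stage pipeline: flatten all paths into (positioned-node, increment) contributions
-- (1 at endpoints, 2 interior, nothing for paths shorter than 2), then aggregate in one pass.

-- ===== PORT A =====
-- the inner 'for idx in range(len(path) - 1)' loop of A (pyGetD is exact: idx and idx+1 are always in range)
def pvStepA (degrees : PySem.Dict (Int × String) Int) (path : List String) : PySem.Dict (Int × String) Int :=
  (PySem.List.pyRange 0 ((path.length : Int) - 1) 1).foldl (fun degrees idx =>
    let n1 : Int × String := (idx, PySem.List.pyGetD path idx "")
    let n2 : Int × String := (idx + 1, PySem.List.pyGetD path (idx + 1) "")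
    let degrees := degrees.insert n1 (degrees.getD n1 0 + 1)
    degrees.insert n2 (degrees.getD n2 0 + 1)) degrees

def degree_from_paths_py (paths : List (List String)) : List (Int × String × Int) :=
  ((paths.foldl pvStepA PySem.Dict.empty).items).map (fun q => (q.1.1, q.1.2, q.2))

-- ===== PORT B =====
-- one path's contribution list: nothing if len < 2, else one (key, inc) pair per position
-- (path[idx] with idx ∈ range(len(path)) is always in range, so List.getD is exact)
def pvPathContrib (path : List String) : List ((Int × String) × Int) :=
  if path.length < 2 then []
  else (List.range path.length).map (fun (idx : Nat) =>
    (((idx : Int), path.getD idx ""), if idx = 0 ∨ idx = path.length - 1 then (1 : Int) else 2))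

def degree_from_paths_py_alt (paths : List (List String)) : List (Int × String × Int) :=
  -- pass 1: the flattened contribution list (paths.flatMap pvPathContrib); pass 2: aggregate it
  (((paths.flatMap pvPathContrib).foldl (fun degrees q => degrees.insert q.1 (degrees.getD q.1 0 + q.2))
      PySem.Dict.empty).items).map (fun q => (q.1.1, q.1.2, q.2))

-- ===== PRECONDITION & SPEC =====
def Spec_degree_from_paths_py (paths : List (List String)) (out : List (Int × String × Int)) : Prop := out = degree_from_paths_py_alt paths
instance (paths : List (List String)) (out : List (Int × String × Int)) : Decidable (Spec_degree_from_paths_py paths out) := by unfold Spec_degree_from_paths_py; infer_instance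

-- ===== CLAIM (what is proved, stated in full; the proofs are below) =====
def Claim_equal_degree_from_paths_py : Prop := ∀ (paths : List (List String)), Dom_degree_from_paths_py paths → Spec_degree_from_paths_py paths (degree_from_paths_py paths)

-- ===== LEMMAS AND PROOFS =====

-- positioned node key and B's per-position increment, over Nat indices
def pvKey (p : List String) (i : Nat) : Int × String := ((i : Int), p.getD i "")
def pvWgt (n i : Nat) : Int := if i = 0 ∨ i = n - 1 then 1 else 2
-- B's aggregation step
def pvAgg (d : PySem.Dict (Int × String) Int) (q : (Int × String) × Int) : PySem.Dict (Int × String) Int :=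
  d.insert q.1 (d.getD q.1 0 + q.2)
-- the flattened sequence of keys bumped (by 1 each) by A's edge loop over range m
def pvE (p : List String) (m : Nat) : List (Int × String) :=
  (List.range m).flatMap (fun i => [pvKey p i, pvKey p (i + 1)])

theorem pvKey_inj (p : List String) {i j : Nat} (h : pvKey p i = pvKey p j) : i = j := by
  have := congrArg Prod.fst h
  simpa [pvKey] using this

-- a fold over a flatMap is the fold of the per-element folds
theorem pv_foldl_flatMap {α β γ : Type} (f : α → List β) (g : γ → β → γ) (l : List α) (d : γ) :
    (l.flatMap f).foldl g d = l.foldl (fun d x => (f x).foldl g d) d := by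
  induction l generalizing d with
  | nil => rfl
  | cons x xs ih => simp [List.flatMap_cons, List.foldl_append, ih]

-- A's double-bump loop over indices = single-bump loop over the flattened key list
theorem pv_foldl_pair (p : List String) (l : List Nat) (d : PySem.Dict (Int × String) Int) :
    l.foldl (fun d i =>
      (d.insert (pvKey p i) (d.getD (pvKey p i) 0 + 1)).insert (pvKey p (i + 1))
        ((d.insert (pvKey p i) (d.getD (pvKey p i) 0 + 1)).getD (pvKey p (i + 1)) 0 + 1)) d
    = (l.flatMap (fun i => [pvKey p i, pvKey p (i + 1)])).foldl
        (fun d k => d.insert k (d.getD k 0 + 1)) d := by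
  induction l generalizing d with
  | nil => simp
  | cons x xs ih => simp [List.flatMap_cons, ih]

-- first-occurrence dedup of A's key sequence is the position list 0..m
theorem pv_ofList_pvE (p : List String) : ∀ m : Nat, 1 ≤ m →
    PySem.Set.ofList (pvE p m) = (List.range (m + 1)).map (pvKey p) := by
  intro m hm
  induction m, hm using Nat.le_induction with
  | base =>
    have h01 : pvKey p 0 ≠ pvKey p 1 := fun h => by simpa using pvKey_inj p h
    simp [pvE, List.range_succ]
    rw [PySem.Set.ofList_cons, PySem.Set.ofList_cons]
    simp [PySem.Set.discard, h01.symm, PySem.Set.ofList_nil]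
  | succ m hm ih =>
    have hmem : pvKey p m ∈ (List.range (m + 1)).map (pvKey p) := by
      exact List.mem_map.2 ⟨m, by simp, rfl⟩
    have hnot : pvKey p (m + 1) ∉ (List.range (m + 1)).map (pvKey p) := by
      intro h
      rcases List.mem_map.1 h with ⟨j, hj, hkey⟩
      have := pvKey_inj p hkey.symm
      simp at hj; omega
    have : pvE p (m + 1) = pvE p m ++ [pvKey p m, pvKey p (m + 1)] := by
      simp [pvE, List.range_succ]
    rw [this, PySem.Set.ofList_append, PySem.Set.update_cons, PySem.Set.update_cons,
      PySem.Set.update_nil, ih, PySem.Set.add_of_mem hmem, PySem.Set.add_of_not_mem hnot,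
      List.range_succ (n := m + 1), List.map_append]
    simp

-- B's weighted-bump loop, characterised by getD
theorem pv_getD_wfold (p : List String) (n : Nat) (l : List Nat)
    (d : PySem.Dict (Int × String) Int) (k : Int × String) :
    (l.foldl (fun d i => d.insert (pvKey p i) (d.getD (pvKey p i) 0 + pvWgt n i)) d).getD k 0
    = d.getD k 0 + (l.map (fun i => if pvKey p i = k then pvWgt n i else 0)).sum := by
  induction l generalizing d with
  | nil => simp
  | cons x xs ih =>
    rw [List.foldl_cons, ih, PySem.Dict.getD_insert]
    by_cases h : k = pvKey p x
    · simp [h, add_assoc]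
    · have h' : ¬ pvKey p x = k := fun hh => h hh.symm
      simp [h, h']

theorem pv_sum_map_add (l : List Nat) (f g : Nat → Int) :
    (l.map (fun x => f x + g x)).sum = (l.map f).sum + (l.map g).sum := by
  induction l with
  | nil => simp
  | cons x xs ih => simp [ih]; ring

-- count of a key in A's flattened key sequence, as a sum
theorem pv_count_pvE (p : List String) (k : Int × String) (l : List Nat) :
    ((l.flatMap (fun i => [pvKey p i, pvKey p (i + 1)])).count k : Int)
    = (l.map (fun i => (if pvKey p i = k then (1 : Int) else 0)
        + (if pvKey p (i + 1) = k then (1 : Int) else 0))).sum := by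
  induction l with
  | nil => simp
  | cons x xs ih =>
    rw [List.flatMap_cons, List.count_append, Nat.cast_add, ih, List.map_cons, List.sum_cons]
    have hc : (([pvKey p x, pvKey p (x + 1)].count k : Nat) : Int)
        = (if pvKey p x = k then (1 : Int) else 0) + (if pvKey p (x + 1) = k then (1 : Int) else 0) := by
      by_cases h1 : pvKey p x = k <;> by_cases h2 : pvKey p (x + 1) = k <;> simp [h1, h2]
    rw [hc]

-- the central arithmetic fact: total increments agree at every key (n ≥ 2)
theorem pv_sum_eq (p : List String) (n : Nat) (hn : 2 ≤ n) (k : Int × String) :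
    ((pvE p (n - 1)).count k : Int)
    = ((List.range n).map (fun i => if pvKey p i = k then pvWgt n i else 0)).sum := by
  obtain ⟨m, rfl⟩ : ∃ m, n = m + 1 := ⟨n - 1, by omega⟩
  have hm : 1 ≤ m := by omega
  unfold pvE
  rw [show m + 1 - 1 = m by omega] at *
  have hsplit : (List.range (m + 1)).map (fun i => if pvKey p i = k then pvWgt (m + 1) i else 0)
      = (List.range (m + 1)).map (fun i =>
          (if i < m ∧ pvKey p i = k then (1 : Int) else 0)
          + (if 1 ≤ i ∧ pvKey p i = k then (1 : Int) else 0)) := by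
    apply List.map_congr_left
    intro i hi
    have hi' : i < m + 1 := List.mem_range.1 hi
    by_cases hk : pvKey p i = k
    · rcases Nat.eq_zero_or_pos i with h0 | h1
      · subst h0; simp [pvWgt, hk]; omega
      · by_cases hlast : i = m
        · subst hlast; simp [pvWgt, hk]; omega
        · have : ¬ (i = 0 ∨ i = m + 1 - 1) := by omega
          simp [pvWgt, hk]
          omega
    · simp [hk]
  rw [hsplit, pv_sum_map_add]
  have hS1 : (List.range (m + 1)).map (fun i => if i < m ∧ pvKey p i = k then (1 : Int) else 0)
      = ((List.range m).map (fun i => if pvKey p i = k then (1 : Int) else 0)) ++ [0] := by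
    rw [List.range_succ, List.map_append]
    congr 1
    · apply List.map_congr_left
      intro i hi
      have : i < m := List.mem_range.1 hi
      simp [this]
    · simp
  have hS2 : (List.range (m + 1)).map (fun i => if 1 ≤ i ∧ pvKey p i = k then (1 : Int) else 0)
      = 0 :: ((List.range m).map (fun i => if pvKey p (i + 1) = k then (1 : Int) else 0)) := by
    rw [List.range_succ_eq_map, List.map_cons, List.map_map]
    congr 1
    · simp
  rw [hS1, hS2]
  rw [pv_count_pvE, pv_sum_map_add]
  simp

-- bridge A's inner loop (pyRange / pyGetD, Int indices) to the Nat-level flattened fold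
theorem pv_stepA_eq (p : List String) (d : PySem.Dict (Int × String) Int) :
    pvStepA d p = (pvE p (p.length - 1)).foldl (fun d k => d.insert k (d.getD k 0 + 1)) d := by
  unfold pvStepA pvE
  rw [PySem.List.pyRange_one, List.foldl_map, ← pv_foldl_pair]
  rw [show ((p.length : Int) - 1 - 0).toNat = p.length - 1 by omega]
  apply PySem.List.foldl_congr_mem
  intro acc i _
  have h1 : (0 : Int) + (i : Int) = ((i : Nat) : Int) := by ring
  have h2' : (i : Int) + 1 = (((i + 1 : Nat)) : Int) := by push_cast; ring
  simp only [h1, h2', PySem.List.pyGetD_natCast, pvKey]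

-- bridge B's per-path contribution fold to the Nat-level weighted fold (for paths of length ≥ 2)
theorem pv_stepB_eq (p : List String) (d : PySem.Dict (Int × String) Int) (hn : 2 ≤ p.length) :
    (pvPathContrib p).foldl pvAgg d = (List.range p.length).foldl
      (fun d i => d.insert (pvKey p i) (d.getD (pvKey p i) 0 + pvWgt p.length i)) d := by
  unfold pvPathContrib
  rw [if_neg (by omega), List.foldl_map]
  rfl

-- per path: A's edge loop and B's contribution fold build the same dict (from any Nodup-keyed dict)
theorem pv_step_eq (p : List String) (d : PySem.Dict (Int × String) Int) (hd : d.keys.Nodup) :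
    pvStepA d p = (pvPathContrib p).foldl pvAgg d := by
  by_cases hn : p.length < 2
  · have hE : pvE p (p.length - 1) = [] := by
      have : p.length - 1 = 0 := by omega
      simp [pvE, this]
    rw [pv_stepA_eq, hE]
    unfold pvPathContrib
    rw [if_pos hn]
    simp
  · have hn' : 2 ≤ p.length := by omega
    rw [pv_stepA_eq, pv_stepB_eq p d hn']
    have hnodA : ((pvE p (p.length - 1)).foldl (fun d k => d.insert k (d.getD k 0 + 1)) d).keys.Nodup :=
      PySem.Dict.nodup_keys_foldl_insert _ _ _ hd
    have hnodB : ((List.range p.length).foldl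
        (fun d i => d.insert (pvKey p i) (d.getD (pvKey p i) 0 + pvWgt p.length i)) d).keys.Nodup :=
      PySem.Dict.nodup_keys_foldl_insert_key _ _ _ _ hd
    have hkeys : ((pvE p (p.length - 1)).foldl (fun d k => d.insert k (d.getD k 0 + 1)) d).keys
        = ((List.range p.length).foldl
            (fun d i => d.insert (pvKey p i) (d.getD (pvKey p i) 0 + pvWgt p.length i)) d).keys := by
      rw [PySem.Dict.keys_foldl_insert, PySem.Dict.keys_foldl_insert_key]
      rw [PySem.Set.update_eq_append_filter, PySem.Set.update_eq_append_filter]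
      rw [pv_ofList_pvE p (p.length - 1) (by omega), show p.length - 1 + 1 = p.length by omega]
      rw [PySem.Set.ofList_eq_self_of_nodup]
      exact List.nodup_range.map (fun {a b} h => pvKey_inj p h)
    apply PySem.Dict.ext
    rw [PySem.Dict.items_eq_map_keys _ hnodA 0, PySem.Dict.items_eq_map_keys _ hnodB 0, hkeys]
    apply List.map_congr_left
    intro k _
    congr 1
    rw [PySem.Dict.getD_foldl_insert_add_one, pv_getD_wfold]
    rw [pv_sum_eq p p.length hn' k]

theorem pv_stepB_nodup (p : List String) (d : PySem.Dict (Int × String) Int) (hd : d.keys.Nodup) :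
    ((pvPathContrib p).foldl pvAgg d).keys.Nodup := by
  unfold pvAgg
  exact PySem.Dict.nodup_keys_foldl_insert_key _ _ _ _ hd

theorem pv_fold_eq (paths : List (List String)) :
    ∀ (d : PySem.Dict (Int × String) Int), d.keys.Nodup →
      paths.foldl pvStepA d = paths.foldl (fun d p => (pvPathContrib p).foldl pvAgg d) d := by
  induction paths with
  | nil => intro d _; rfl
  | cons p ps ih =>
    intro d hd
    rw [List.foldl_cons, List.foldl_cons, pv_step_eq p d hd]
    exact ih _ (pv_stepB_nodup p d hd)

-- ===== VERDICT (by name: the statement is the Claim_ definition above) =====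
theorem degree_from_paths_py_spec : Claim_equal_degree_from_paths_py := by
  intro paths _
  unfold Spec_degree_from_paths_py degree_from_paths_py degree_from_paths_py_alt
  rw [pv_foldl_flatMap]
  rw [pv_fold_eq paths PySem.Dict.empty (by simp [PySem.Dict.keys_empty])]
  rfl
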